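-- pv_equiv track=rewrite | github.com/guidocioni/icon-2i | utils.py | get_file_mapping
-- ===== SOURCE A (Python) =====
-- def get_file_mapping(var):
--     # Define valid variables and their corresponding levels and mappings
--     pressure_vars = ["U", "V", "T", "QV", "OMEGA", "FI"]
--     pressure_levels = [1000, 925, 850, 700, 500, 250]
--     soil_vars = ["W_SO", "T_SO"]
--     soil_levels = [0, 1, 2, 7]
--     shear_vars = ["WSHEAR_U", "WSHEAR_V"]
--
--     mappings = []
--
--     if var in pressure_vars:
--         mappings = [(f"isobaricInhPa-{lev}", lev) for lev in pressure_levels]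
--     elif var in soil_vars:
--         mappings = [(f"depthBelowLandLayer-{lev}", lev) for lev in soil_levels]
--     elif var in shear_vars:
--         mappings = [("heightAboveGroundLayer-6000", 6000)]
--     elif var == "CLCH":
--         mappings = [("isobaricLayer-0", 0)]
--     elif var == "CLCL":
--         mappings = [("isobaricLayer-800", 800)]
--     elif var == "CLCM":
--         mappings = [("isobaricLayer-400", 400)]
--
--     return mappings
-- ===== SOURCE B (Python) =====
-- _GROUPS = [
--     (("U", "V", "T", "QV", "OMEGA", "FI"), "isobaricInhPa",
--      (1000, 925, 850, 700, 500, 250)),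
--     (("W_SO", "T_SO"), "depthBelowLandLayer", (0, 1, 2, 7)),
--     (("WSHEAR_U", "WSHEAR_V"), "heightAboveGroundLayer", (6000,)),
--     (("CLCH",), "isobaricLayer", (0,)),
--     (("CLCL",), "isobaricLayer", (800,)),
--     (("CLCM",), "isobaricLayer", (400,)),
-- ]
--
-- # Inverted index: variable name -> (level type, levels).
-- _SPEC = {name: (ltype, levels)
--          for names, ltype, levels in _GROUPS
--          for name in names}
--
--
-- def get_file_mapping(var):
--     spec = _SPEC.get(var)
--     if spec is None:
--         return []
--     ltype, levels = spec
--     return [(f"{ltype}-{lev}", lev) for lev in levels]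
-- ===== Notes on version B (the rewrite author's own statement) =====
-- stated objective: idiomatic
-- what changed: A's six hard-coded branch bodies are replaced by one data-driven spec table (groups of names with their level type and levels), inverted once into a name->(level_type, levels) index, and a single generic comprehension that builds the mappings from the looked-up spec.
import Mathlib
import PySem

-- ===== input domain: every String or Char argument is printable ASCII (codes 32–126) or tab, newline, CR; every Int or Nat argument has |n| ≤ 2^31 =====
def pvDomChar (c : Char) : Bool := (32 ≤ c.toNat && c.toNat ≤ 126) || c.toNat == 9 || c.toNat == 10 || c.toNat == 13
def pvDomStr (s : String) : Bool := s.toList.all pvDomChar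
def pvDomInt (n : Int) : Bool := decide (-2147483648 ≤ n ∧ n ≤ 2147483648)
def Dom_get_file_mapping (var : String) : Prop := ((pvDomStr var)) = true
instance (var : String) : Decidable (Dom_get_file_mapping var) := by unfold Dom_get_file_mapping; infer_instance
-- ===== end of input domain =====

-- B replaces A's six hard-coded branches by a data-driven spec table inverted into a name -> (level type, levels) index, with one generic constructor (idiomatic; same return value).

-- ===== PORT A =====
def get_file_mapping (var : String) : List (String × Int) :=
  let pressure_vars : List String := ["U", "V", "T", "QV", "OMEGA", "FI"]
  let pressure_levels : List Int := [1000, 925, 850, 700, 500, 250]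
  let soil_vars : List String := ["W_SO", "T_SO"]
  let soil_levels : List Int := [0, 1, 2, 7]
  let shear_vars : List String := ["WSHEAR_U", "WSHEAR_V"]
  if var ∈ pressure_vars then
    pressure_levels.map (fun lev => ("isobaricInhPa-" ++ PySem.Int.toStr lev, lev))
  else if var ∈ soil_vars then
    soil_levels.map (fun lev => ("depthBelowLandLayer-" ++ PySem.Int.toStr lev, lev))
  else if var ∈ shear_vars then
    [("heightAboveGroundLayer-6000", 6000)]
  else if var = "CLCH" then
    [("isobaricLayer-0", 0)]
  else if var = "CLCL" then
    [("isobaricLayer-800", 800)]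
  else if var = "CLCM" then
    [("isobaricLayer-400", 400)]
  else []

-- ===== PORT B =====
def pvGroups : List (List String × String × List Int) :=
  [(["U", "V", "T", "QV", "OMEGA", "FI"], "isobaricInhPa",
    ([1000, 925, 850, 700, 500, 250] : List Int)),
   (["W_SO", "T_SO"], "depthBelowLandLayer", ([0, 1, 2, 7] : List Int)),
   (["WSHEAR_U", "WSHEAR_V"], "heightAboveGroundLayer", ([6000] : List Int)),
   (["CLCH"], "isobaricLayer", ([0] : List Int)),
   (["CLCL"], "isobaricLayer", ([800] : List Int)),
   (["CLCM"], "isobaricLayer", ([400] : List Int))]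

-- the dict comprehension building the inverted index _SPEC
def pvSpec : PySem.Dict String (String × List Int) :=
  PySem.Dict.ofList
    (pvGroups.flatMap (fun g => g.1.map (fun name => (name, g.2))))

def get_file_mapping_alt (var : String) : List (String × Int) :=
  match pvSpec.get? var with
  | none => []
  | some (ltype, levels) =>
      levels.map (fun lev => (ltype ++ "-" ++ PySem.Int.toStr lev, lev))

-- ===== PRECONDITION & SPEC =====
def Spec_get_file_mapping (var : String) (out : List (String × Int)) : Prop := out = get_file_mapping_alt var
instance (var : String) (out : List (String × Int)) : Decidable (Spec_get_file_mapping var out) := by unfold Spec_get_file_mapping; infer_instance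

-- ===== CLAIM =====
def Claim_equal_get_file_mapping : Prop := ∀ (var : String), Dom_get_file_mapping var → Spec_get_file_mapping var (get_file_mapping var)

-- ===== LEMMAS AND PROOFS =====

-- ===== VERDICT =====
theorem get_file_mapping_spec : Claim_equal_get_file_mapping := by
  intro var _
  show get_file_mapping var = get_file_mapping_alt var
  by_cases h1 : var = "U"; · subst h1; decide
  by_cases h2 : var = "V"; · subst h2; decide
  by_cases h3 : var = "T"; · subst h3; decide
  by_cases h4 : var = "QV"; · subst h4; decide
  by_cases h5 : var = "OMEGA"; · subst h5; decide
  by_cases h6 : var = "FI"; · subst h6; decide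
  by_cases h7 : var = "W_SO"; · subst h7; decide
  by_cases h8 : var = "T_SO"; · subst h8; decide
  by_cases h9 : var = "WSHEAR_U"; · subst h9; decide
  by_cases h10 : var = "WSHEAR_V"; · subst h10; decide
  by_cases h11 : var = "CLCH"; · subst h11; decide
  by_cases h12 : var = "CLCL"; · subst h12; decide
  by_cases h13 : var = "CLCM"; · subst h13; decide
  simp [get_file_mapping, get_file_mapping_alt, pvSpec, pvGroups,
    PySem.Dict.ofList, PySem.Dict.update, PySem.Dict.get?_insert,
    PySem.Dict.get?_empty, h1, h2, h3, h4, h5, h6, h7, h8, h9, h10, h11, h12, h13]
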